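-- pv_equiv track=rewrite | github.com/Jayesh-Kamble/aave-credit-scoring | src/scoring.py | categorize_scores
-- ===== SOURCE A (Python) =====
-- def categorize_scores(scores):
--     """Categorize scores into risk buckets"""
--
--     categories = []
--     for score in scores:
--         if score >= 800:
--             categories.append('Excellent')
--         elif score >= 600:
--             categories.append('Good')
--         elif score >= 400:
--             categories.append('Fair')
--         elif score >= 200:
--             categories.append('Poor')
--         else:
--             categories.append('Very Poor')
--
--     return categories
-- ===== SOURCE B (Python) =====
-- import bisect
--
-- _THRESHOLDS = [200, 400, 600, 800]
-- _LABELS = ['Very Poor', 'Poor', 'Fair', 'Good', 'Excellent']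
--
-- def categorize_scores(scores):
--     """Categorize scores into risk buckets"""
--     return [_LABELS[bisect.bisect_right(_THRESHOLDS, score)] for score in scores]
-- ===== Notes on version B (the rewrite author's own statement) =====
-- stated objective: idiomatic
-- what changed: Replaces the if/elif cascade with a sorted threshold table and a parallel label list indexed by bisect_right (binary search), built as a list comprehension instead of an append loop.
import Mathlib
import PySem

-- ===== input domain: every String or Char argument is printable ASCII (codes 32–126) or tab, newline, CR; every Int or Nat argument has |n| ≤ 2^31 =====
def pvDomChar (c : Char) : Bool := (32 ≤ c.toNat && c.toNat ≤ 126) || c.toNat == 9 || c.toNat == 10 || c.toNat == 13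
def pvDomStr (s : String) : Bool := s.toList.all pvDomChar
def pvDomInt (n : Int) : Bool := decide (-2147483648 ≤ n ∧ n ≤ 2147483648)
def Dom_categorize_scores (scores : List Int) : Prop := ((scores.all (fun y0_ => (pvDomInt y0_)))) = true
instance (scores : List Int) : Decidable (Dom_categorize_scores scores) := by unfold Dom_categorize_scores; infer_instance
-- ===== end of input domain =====

-- B replaces A's if/elif cascade with a threshold table indexed by binary search (bisect_right); same values, idiomatic table-lookup form.
-- ===== PORT A =====
def categorize_scores (scores : List Int) : List String :=
  scores.foldl (fun categories score =>
    if score ≥ 800 then categories ++ ["Excellent"]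
    else if score ≥ 600 then categories ++ ["Good"]
    else if score ≥ 400 then categories ++ ["Fair"]
    else if score ≥ 200 then categories ++ ["Poor"]
    else categories ++ ["Very Poor"]) []

-- ===== PORT B =====
-- literal port of bisect.bisect_right(a, x) (lo=0, hi=len(a)): binary search loop
def pvBisectRight (a : List Int) (x : Int) (lo hi : Nat) : Nat :=
  if lo < hi then
    let mid := (lo + hi) / 2
    if x < a.getD mid 0 then pvBisectRight a x lo mid
    else pvBisectRight a x (mid + 1) hi
  else lo
termination_by hi - lo
decreasing_by all_goals omega

def pvThresholds : List Int := [200, 400, 600, 800]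
def pvLabels : List String := ["Very Poor", "Poor", "Fair", "Good", "Excellent"]

-- the bisect index is always in [0,4], so getD never hits the default
def categorize_scores_alt (scores : List Int) : List String :=
  scores.map (fun score => pvLabels.getD (pvBisectRight pvThresholds score 0 4) "")

-- ===== PRECONDITION & SPEC =====
def Spec_categorize_scores (scores : List Int) (out : List String) : Prop := out = categorize_scores_alt scores
instance (scores : List Int) (out : List String) : Decidable (Spec_categorize_scores scores out) := by unfold Spec_categorize_scores; infer_instance

-- ===== CLAIM (what is proved, stated in full; the proofs are below) =====
def Claim_equal_categorize_scores : Prop := ∀ (scores : List Int), Dom_categorize_scores scores → Spec_categorize_scores scores (categorize_scores scores)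

-- ===== LEMMAS AND PROOFS =====

-- ===== VERDICT (by name: the statement is the Claim_ definition above) =====
-- per-element: B's table lookup equals A's cascade value
lemma pv_elem (s : Int) :
    pvLabels.getD (pvBisectRight pvThresholds s 0 4) ""
    = (if s ≥ 800 then "Excellent"
       else if s ≥ 600 then "Good"
       else if s ≥ 400 then "Fair"
       else if s ≥ 200 then "Poor"
       else "Very Poor") := by
  rcases lt_or_ge s 200 with h | h
  · have e : pvBisectRight pvThresholds s 0 4 = 0 := by
      simp [pvBisectRight, pvThresholds, show s < 600 by omega, show s < 400 by omega, h]
    simp [e, pvLabels, show ¬ s ≥ 800 by omega, show ¬ s ≥ 600 by omega,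
      show ¬ s ≥ 400 by omega, show ¬ s ≥ 200 by omega]
  rcases lt_or_ge s 400 with h4 | h4
  · have e : pvBisectRight pvThresholds s 0 4 = 1 := by
      simp [pvBisectRight, pvThresholds, show s < 600 by omega, h4, show ¬ s < 200 by omega]
    simp [e, pvLabels, show ¬ s ≥ 800 by omega, show ¬ s ≥ 600 by omega,
      show ¬ s ≥ 400 by omega, show s ≥ 200 by omega]
  rcases lt_or_ge s 600 with h6 | h6
  · have e : pvBisectRight pvThresholds s 0 4 = 2 := by
      simp [pvBisectRight, pvThresholds, h6, show ¬ s < 400 by omega]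
    simp [e, pvLabels, show ¬ s ≥ 800 by omega, show ¬ s ≥ 600 by omega,
      show s ≥ 400 by omega]
  rcases lt_or_ge s 800 with h8 | h8
  · have e : pvBisectRight pvThresholds s 0 4 = 3 := by
      simp [pvBisectRight, pvThresholds, show ¬ s < 600 by omega, h8]
    simp [e, pvLabels, show ¬ s ≥ 800 by omega, show s ≥ 600 by omega]
  · have e : pvBisectRight pvThresholds s 0 4 = 4 := by
      simp [pvBisectRight, pvThresholds, show ¬ s < 600 by omega, show ¬ s < 800 by omega]
    simp [e, pvLabels, show s ≥ 800 by omega]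

lemma pv_foldl (scores : List Int) (acc : List String) :
    scores.foldl (fun categories score =>
      if score ≥ 800 then categories ++ ["Excellent"]
      else if score ≥ 600 then categories ++ ["Good"]
      else if score ≥ 400 then categories ++ ["Fair"]
      else if score ≥ 200 then categories ++ ["Poor"]
      else categories ++ ["Very Poor"]) acc
    = acc ++ scores.map (fun score => pvLabels.getD (pvBisectRight pvThresholds score 0 4) "") := by
  induction scores generalizing acc with
  | nil => simp
  | cons x xs ih =>
    simp only [List.foldl_cons, List.map_cons]
    rw [ih, pv_elem x]
    split_ifs <;> simp

theorem categorize_scores_spec : Claim_equal_categorize_scores := by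
  intro scores _
  unfold Spec_categorize_scores categorize_scores categorize_scores_alt
  simpa using pv_foldl scores []
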